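-- pv_equiv track=rewrite | github.com/rgklab/ExOSITO | src/data_loader/datasets/labtest_order.py | has_2_unit_decrease_in_past_24_hours
-- ===== SOURCE A (Python) =====
-- def has_2_unit_decrease_in_past_24_hours(t, x, curr_time):
--     for i in range(len(t) - 1, 0, -1):  # Start from the most recent time
--         current_time = curr_time  # t[i]
--         past_24_hours_time = current_time - 24
--
--         # Get the index of the earliest time within the past 24 hours
--         j = i
--         while j >= 0 and t[j] > past_24_hours_time:
--             j -= 1
--
--         # Check if any value within the past 24 hours has changed by 5 or more units
--         for k in range(j + 1, i):
--             if x[k] - x[i] >= 2: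
--                 return True
--     return False
-- ===== SOURCE B (Python) =====
-- def has_2_unit_decrease_in_past_24_hours(t, x, curr_time):
--     past = curr_time - 24
--     m = None  # max of x over the current run of times > past, before the current index
--     for ti, xi in zip(t, x):
--         if ti <= past:
--             m = None
--         else:
--             if m is not None and m >= xi + 2:
--                 return True
--             m = xi if m is None else max(m, xi)
--     return False
-- ===== Notes on version B (the rewrite author's own statement) =====
-- stated objective: faster
-- what changed: Replaced the quadratic scan (for each recent index, rewind to the 24h-window start and rescan the window) by a single left-to-right pass that keeps the running max of x over the current run of timestamps inside the 24h window and compares it to x[i]+2.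
import Mathlib
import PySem

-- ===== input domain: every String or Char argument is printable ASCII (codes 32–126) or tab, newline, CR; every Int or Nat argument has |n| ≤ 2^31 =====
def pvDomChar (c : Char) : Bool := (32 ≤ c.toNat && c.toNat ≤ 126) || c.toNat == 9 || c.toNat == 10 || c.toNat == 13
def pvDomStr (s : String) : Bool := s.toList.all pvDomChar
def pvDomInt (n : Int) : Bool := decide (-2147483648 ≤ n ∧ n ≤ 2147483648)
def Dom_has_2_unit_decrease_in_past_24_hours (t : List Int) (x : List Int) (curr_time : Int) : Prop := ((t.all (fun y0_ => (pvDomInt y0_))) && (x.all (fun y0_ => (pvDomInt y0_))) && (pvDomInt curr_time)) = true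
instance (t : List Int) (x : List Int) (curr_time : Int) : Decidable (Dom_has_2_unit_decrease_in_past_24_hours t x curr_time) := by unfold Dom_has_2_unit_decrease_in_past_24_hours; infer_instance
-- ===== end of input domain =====

-- B replaces A's quadratic rescan of every 24h window by one left-to-right pass keeping the
-- running max of x over the current run of in-window timestamps (objective: faster, O(n^2) → O(n)).

-- ===== PORT A =====
-- the `while j >= 0 and t[j] > past: j -= 1` loop; j stays in [0, len t) at every t[j] access,
-- so `getD` is exact there; returns the final j (an Int, -1 when the loop runs off the front)
def pvFindJ (t : List Int) (past : Int) : Nat → Int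
  | 0 => if t.getD 0 0 > past then -1 else 0
  | j + 1 => if t.getD (j + 1) 0 > past then pvFindJ t past j else ((j : Int) + 1)

-- x[k], x[i]: in range under Pre_ (0 ≤ j+1 ≤ k < i < len t ≤ len x), so pyGetD is exact there
def has_2_unit_decrease_in_past_24_hours (t : List Int) (x : List Int) (curr_time : Int) : Bool :=
  (PySem.List.pyRange (PySem.List.len t - 1) 0 (-1)).any (fun i =>
    let past_24_hours_time := curr_time - 24
    let j := pvFindJ t past_24_hours_time i.toNat
    (PySem.List.pyRange (j + 1) i 1).any (fun k =>
      decide (PySem.List.pyGetD x k 0 - PySem.List.pyGetD x i 0 ≥ 2)))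

-- ===== PORT B =====
-- Source B's loop: m is the running max of x over the current run of times > past (None after a reset)
def pvAltLoop (past : Int) : List (Int × Int) → Option Int → Bool
  | [], _ => false
  | (ti, xi) :: rest, m =>
    if ti ≤ past then pvAltLoop past rest none
    else
      match m with
      | some v => if v ≥ xi + 2 then true else pvAltLoop past rest (some (max v xi))
      | none => pvAltLoop past rest (some xi)

def has_2_unit_decrease_in_past_24_hours_alt (t : List Int) (x : List Int) (curr_time : Int) : Bool :=
  pvAltLoop (curr_time - 24) (t.zip x) none

-- ===== PRECONDITION & SPEC =====
-- Pre_ holds exactly where A returns: A indexes x by positions of t, so it raises IndexError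
-- precisely when some nonempty 24h window (two consecutive times > curr_time - 24) sits at an
-- index i ≥ len(x); Pre_ excludes exactly those inputs (it excludes nothing A returns on).
def Pre_has_2_unit_decrease_in_past_24_hours (t : List Int) (x : List Int) (curr_time : Int) : Prop :=
  ∀ i : Nat, i < t.length → x.length ≤ i → 1 ≤ i →
    ¬(t.getD i 0 > curr_time - 24 ∧ t.getD (i - 1) 0 > curr_time - 24)
instance (t : List Int) (x : List Int) (curr_time : Int) : Decidable (Pre_has_2_unit_decrease_in_past_24_hours t x curr_time) := by unfold Pre_has_2_unit_decrease_in_past_24_hours; infer_instance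

def pvWitness_has_2_unit_decrease_in_past_24_hours : List Int × List Int × Int := ([0, 20, 21], [5, 9, 1], 30)

def Spec_has_2_unit_decrease_in_past_24_hours (t : List Int) (x : List Int) (curr_time : Int) (out : Bool) : Prop := out = has_2_unit_decrease_in_past_24_hours_alt t x curr_time
instance (t : List Int) (x : List Int) (curr_time : Int) (out : Bool) : Decidable (Spec_has_2_unit_decrease_in_past_24_hours t x curr_time out) := by unfold Spec_has_2_unit_decrease_in_past_24_hours; infer_instance

-- ===== CLAIM (what is proved, stated in full; the proofs are below) =====
def Claim_equal_has_2_unit_decrease_in_past_24_hours : Prop := ∀ (t : List Int) (x : List Int) (curr_time : Int), Dom_has_2_unit_decrease_in_past_24_hours t x curr_time → Pre_has_2_unit_decrease_in_past_24_hours t x curr_time → Spec_has_2_unit_decrease_in_past_24_hours t x curr_time (has_2_unit_decrease_in_past_24_hours t x curr_time)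

-- ===== LEMMAS AND PROOFS =====

theorem pvFindJ_le (t : List Int) (past : Int) (j : Nat) : pvFindJ t past j ≤ (j : Int) := by
  induction j with
  | zero => simp only [pvFindJ]; split <;> omega
  | succ j ih => simp only [pvFindJ]; split <;> omega

theorem pvFindJ_ge (t : List Int) (past : Int) (j : Nat) : -1 ≤ pvFindJ t past j := by
  induction j with
  | zero => simp only [pvFindJ]; split <;> omega
  | succ j ih => simp only [pvFindJ]; split <;> omega

-- window membership: k lies strictly above the rewind point iff every time in [k, i] is > past
theorem pvFindJ_window (t : List Int) (past : Int) (i k : Nat) (hk : k ≤ i) :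
    pvFindJ t past i < (k : Int) ↔ ∀ j : Nat, k ≤ j → j ≤ i → t.getD j 0 > past := by
  induction i with
  | zero =>
    interval_cases k
    simp only [pvFindJ]
    split
    · rename_i h
      constructor
      · intro _ j h1 h2; interval_cases j; exact h
      · intro _; omega
    · rename_i h
      constructor
      · intro hc; omega
      · intro hall; exact absurd (hall 0 le_rfl le_rfl) h
  | succ i ih =>
    simp only [pvFindJ]
    split
    · rename_i hgt
      rcases Nat.lt_or_ge k (i + 1) with hki | hki
      · have hki' : k ≤ i := by omega
        rw [ih hki']
        constructor
        · intro hall j h1 h2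
          rcases Nat.lt_or_ge j (i + 1) with hj | hj
          · exact hall j h1 (by omega)
          · have : j = i + 1 := by omega
            subst this; exact hgt
        · intro hall j h1 h2; exact hall j h1 (by omega)
      · have hk1 : k = i + 1 := by omega
        subst hk1
        constructor
        · intro _ j h1 h2
          have : j = i + 1 := by omega
          subst this; exact hgt
        · intro _
          have := pvFindJ_le t past i
          push_cast
          omega
    · rename_i hle
      constructor
      · intro hc; push_cast at hc; omega
      · intro hall
        exact absurd (hall (i + 1) (by omega) le_rfl) hle

-- characterisation of A: some pair k < i < len t has every time in [k, i] inside the window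
-- and x[k] at least x[i] + 2
theorem portA_iff (t x : List Int) (curr_time : Int) :
    has_2_unit_decrease_in_past_24_hours t x curr_time = true ↔
      ∃ i k : Nat, k < i ∧ i < t.length ∧
        (∀ j : Nat, k ≤ j → j ≤ i → t.getD j 0 > curr_time - 24) ∧
        x.getD k 0 - x.getD i 0 ≥ 2 := by
  unfold has_2_unit_decrease_in_past_24_hours
  rw [List.any_eq_true]
  constructor
  · rintro ⟨i, hi, hinner⟩
    rw [PySem.List.mem_pyRange_neg_one] at hi
    simp only [PySem.List.len_eq] at hi
    rw [List.any_eq_true] at hinner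
    rcases hinner with ⟨k, hk, hcond⟩
    rw [PySem.List.mem_pyRange_one] at hk
    have hjge := pvFindJ_ge t (curr_time - 24) i.toNat
    have hk0 : 0 ≤ k := by omega
    have hi0 : 0 ≤ i := by omega
    refine ⟨i.toNat, k.toNat, by omega, by omega, ?_, ?_⟩
    · have hwin : pvFindJ t (curr_time - 24) i.toNat < (k.toNat : Int) := by omega
      rw [pvFindJ_window t _ i.toNat k.toNat (by omega)] at hwin
      exact hwin
    · rw [decide_eq_true_iff] at hcond
      rwa [show k = ((k.toNat : Int)) by omega, show i = ((i.toNat : Int)) by omega,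
        PySem.List.pyGetD_natCast, PySem.List.pyGetD_natCast] at hcond
  · rintro ⟨i, k, hki, hin, hwin, hval⟩
    refine ⟨(i : Int), ?_, ?_⟩
    · rw [PySem.List.mem_pyRange_neg_one]
      simp only [PySem.List.len_eq]
      omega
    · rw [List.any_eq_true]
      refine ⟨(k : Int), ?_, ?_⟩
      · rw [PySem.List.mem_pyRange_one]
        have : pvFindJ t (curr_time - 24) (i : Int).toNat < (k : Int) := by
          rw [show (i : Int).toNat = i by omega]
          rw [pvFindJ_window t _ i k (by omega)]
          exact hwin
        omega
      · rw [decide_eq_true_iff]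
        rwa [PySem.List.pyGetD_natCast, PySem.List.pyGetD_natCast]

-- the state of B's pass after processing the first i pairs
def pvMState (t x : List Int) (past : Int) : Nat → Option Int
  | 0 => none
  | i + 1 =>
    if t.getD i 0 ≤ past then none
    else
      match pvMState t x past i with
      | none => some (x.getD i 0)
      | some v => some (max v (x.getD i 0))

-- the state dominates c iff some index of the current run has x-value ≥ c
theorem pvMState_iff (t x : List Int) (past : Int) (i : Nat) (c : Int) :
    (∃ v, pvMState t x past i = some v ∧ v ≥ c) ↔
      ∃ k : Nat, k < i ∧ (∀ j : Nat, k ≤ j → j < i → t.getD j 0 > past) ∧ x.getD k 0 ≥ c := by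
  induction i with
  | zero =>
    simp only [pvMState]
    constructor
    · rintro ⟨v, h, _⟩; cases h
    · rintro ⟨k, hk, _⟩; omega
  | succ i ih =>
    simp only [pvMState]
    split
    · rename_i hle
      constructor
      · rintro ⟨v, h, _⟩; cases h
      · rintro ⟨k, hk, hall, _⟩
        exact absurd (hall i (by omega) (by omega)) (not_lt.mpr hle)
    · rename_i hgt
      rw [not_le] at hgt
      constructor
      · intro h
        rcases hm : pvMState t x past i with _ | v
        · rw [hm] at h
          rcases h with ⟨w, hw, hwc⟩
          simp only [Option.some.injEq] at hw
          refine ⟨i, by omega, fun j h1 h2 => ?_, by omega⟩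
          have : j = i := by omega
          subst this; exact hgt
        · rw [hm] at h
          rcases h with ⟨w, hw, hwc⟩
          simp only [Option.some.injEq] at hw
          subst hw
          rcases le_or_gt c v with hv | hv
          · rcases (ih.mp ⟨v, hm, hv⟩) with ⟨k, hk, hall, hxk⟩
            refine ⟨k, by omega, fun j h1 h2 => ?_, hxk⟩
            rcases Nat.lt_or_ge j i with hj | hj
            · exact hall j h1 hj
            · have : j = i := by omega
              subst this; exact hgt
          · have hxi : x.getD i 0 ≥ c := by
              rcases max_cases v (x.getD i 0) with ⟨he, _⟩ | ⟨he, _⟩ <;> omega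
            refine ⟨i, by omega, fun j h1 h2 => ?_, hxi⟩
            have : j = i := by omega
            subst this; exact hgt
      · rintro ⟨k, hk, hall, hxk⟩
        rcases Nat.lt_or_ge k i with hki | hki
        · have hprev : ∃ v, pvMState t x past i = some v ∧ v ≥ c :=
            ih.mpr ⟨k, hki, fun j h1 h2 => hall j h1 (by omega), hxk⟩
          rcases hprev with ⟨v, hm, hv⟩
          rw [hm]
          exact ⟨max v (x.getD i 0), rfl, le_trans hv (le_max_left _ _)⟩
        · have : k = i := by omega
          subst this
          rcases hm : pvMState t x past k with _ | v
          · exact ⟨x.getD k 0, rfl, hxk⟩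
          · exact ⟨max v (x.getD k 0), rfl, le_trans hxk (le_max_right _ _)⟩

theorem pvZip_drop_cons (t x : List Int) (p : Nat) (hp : p < min t.length x.length) :
    (t.zip x).drop p = (t.getD p 0, x.getD p 0) :: (t.zip x).drop (p + 1) := by
  have hlen : (t.zip x).length = min t.length x.length := List.length_zip
  have hp' : p < (t.zip x).length := by omega
  rw [List.drop_eq_getElem_cons hp']
  congr 1
  rw [List.getElem_zip]
  rw [List.getD_eq_getElem t 0 (by omega), List.getD_eq_getElem x 0 (by omega)]

-- B's pass from position p in state pvMState p finds a hit iff some i ≥ p triggers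
theorem pvAltLoop_iff (t x : List Int) (past : Int) :
    ∀ d p : Nat, min t.length x.length ≤ p + d →
      (pvAltLoop past ((t.zip x).drop p) (pvMState t x past p) = true ↔
        ∃ i : Nat, p ≤ i ∧ i < min t.length x.length ∧ t.getD i 0 > past ∧
          ∃ v, pvMState t x past i = some v ∧ v ≥ x.getD i 0 + 2) := by
  intro d
  induction d with
  | zero =>
    intro p hp
    have hdrop : (t.zip x).drop p = [] := by
      apply List.drop_eq_nil_of_le
      rw [List.length_zip]; omega
    rw [hdrop]
    simp only [pvAltLoop]
    constructor
    · intro h; cases h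
    · rintro ⟨i, h1, h2, _⟩; omega
  | succ d ih =>
    intro p hp
    rcases Nat.lt_or_ge p (min t.length x.length) with hplt | hpge
    · rw [pvZip_drop_cons t x p hplt]
      by_cases hle : t.getD p 0 ≤ past
      · have hstep : pvMState t x past (p + 1) = none := by
          simp only [pvMState, if_pos hle]
        simp only [pvAltLoop, if_pos hle]
        rw [← hstep, ih (p + 1) (by omega)]
        constructor
        · rintro ⟨i, h1, h⟩; exact ⟨i, by omega, h⟩
        · rintro ⟨i, h1, h2, h3, h⟩
          refine ⟨i, ?_, h2, h3, h⟩
          rcases Nat.lt_or_ge p i with hpi | hpi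
          · omega
          · have : i = p := by omega
            subst this; exact absurd h3 (by omega)
      · rw [not_le] at hle
        simp only [pvAltLoop, if_neg (by omega : ¬ t.getD p 0 ≤ past)]
        rcases hm : pvMState t x past p with _ | v
        · have hstep : pvMState t x past (p + 1) = some (x.getD p 0) := by
            simp only [pvMState, if_neg (by omega : ¬ t.getD p 0 ≤ past), hm]
          rw [← hstep, ih (p + 1) (by omega)]
          constructor
          · rintro ⟨i, h1, h⟩; exact ⟨i, by omega, h⟩
          · rintro ⟨i, h1, h2, h3, w, hw, hwc⟩
            refine ⟨i, ?_, h2, h3, w, hw, hwc⟩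
            rcases Nat.lt_or_ge p i with hpi | hpi
            · omega
            · have : i = p := by omega
              subst this; rw [hm] at hw; cases hw
        · by_cases htrig : v ≥ x.getD p 0 + 2
          · simp only [if_pos htrig]
            constructor
            · intro _; exact ⟨p, le_rfl, hplt, hle, v, hm, htrig⟩
            · intro _; trivial
          · simp only [if_neg htrig]
            have hstep : pvMState t x past (p + 1) = some (max v (x.getD p 0)) := by
              simp only [pvMState, if_neg (by omega : ¬ t.getD p 0 ≤ past), hm]
            rw [← hstep, ih (p + 1) (by omega)]
            constructor
            · rintro ⟨i, h1, h⟩; exact ⟨i, by omega, h⟩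
            · rintro ⟨i, h1, h2, h3, w, hw, hwc⟩
              refine ⟨i, ?_, h2, h3, w, hw, hwc⟩
              rcases Nat.lt_or_ge p i with hpi | hpi
              · omega
              · have : i = p := by omega
                subst this; rw [hm] at hw
                simp only [Option.some.injEq] at hw
                omega
    · have hdrop : (t.zip x).drop p = [] := by
        apply List.drop_eq_nil_of_le
        rw [List.length_zip]; omega
      rw [hdrop]
      simp only [pvAltLoop]
      constructor
      · intro h; cases h
      · rintro ⟨i, h1, h2, _⟩; omega

theorem portB_iff (t x : List Int) (curr_time : Int) :
    has_2_unit_decrease_in_past_24_hours_alt t x curr_time = true ↔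
      ∃ i k : Nat, k < i ∧ i < min t.length x.length ∧
        (∀ j : Nat, k ≤ j → j ≤ i → t.getD j 0 > curr_time - 24) ∧
        x.getD k 0 - x.getD i 0 ≥ 2 := by
  unfold has_2_unit_decrease_in_past_24_hours_alt
  have h0 := pvAltLoop_iff t x (curr_time - 24) (min t.length x.length) 0 (by omega)
  rw [List.drop_zero] at h0
  rw [show pvMState t x (curr_time - 24) 0 = none from rfl] at h0
  rw [h0]
  constructor
  · rintro ⟨i, _, hin, hti, hv⟩
    rw [pvMState_iff] at hv
    rcases hv with ⟨k, hki, hall, hxk⟩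
    refine ⟨i, k, hki, hin, fun j h1 h2 => ?_, by omega⟩
    rcases Nat.lt_or_ge j i with hj | hj
    · exact hall j h1 hj
    · have : j = i := by omega
      subst this; exact hti
  · rintro ⟨i, k, hki, hin, hwin, hval⟩
    refine ⟨i, by omega, hin, hwin i (by omega) le_rfl, ?_⟩
    rw [pvMState_iff]
    exact ⟨k, hki, fun j h1 h2 => hwin j h1 (by omega), by omega⟩

-- ===== VERDICT (by name: the statement is the Claim_ definition above) =====
theorem has_2_unit_decrease_in_past_24_hours_spec : Claim_equal_has_2_unit_decrease_in_past_24_hours := by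
  intro t x curr_time _ hpre
  unfold Pre_has_2_unit_decrease_in_past_24_hours at hpre
  unfold Spec_has_2_unit_decrease_in_past_24_hours
  rw [Bool.eq_iff_iff, portA_iff t x curr_time, portB_iff t x curr_time]
  constructor
  · rintro ⟨i, k, hki, hin, hwin, hval⟩
    refine ⟨i, k, hki, ?_, hwin, hval⟩
    by_contra hmin
    have hxi : x.length ≤ i := by omega
    exact hpre i hin hxi (by omega) ⟨hwin i (by omega) le_rfl, hwin (i - 1) (by omega) (by omega)⟩
  · rintro ⟨i, k, hki, hin, hwin, hval⟩
    exact ⟨i, k, hki, by omega, hwin, hval⟩
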